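-- pv_equiv track=rewrite | github.com/zxq-kd/DermINO | pretrain/dinov2/data/datasets/mydataset.py | updata_list
-- ===== SOURCE A (Python) =====
-- def updata_list(lst):
--     if not lst: # empty, no target
--         a = None
--     else:
--         a = [0] * 602
--
--         for index in lst:   # one hot for multi class
--             if 0 <= index < 602:
--                 a[index] = 1
--
--     return a
-- ===== SOURCE B (Python) =====
-- def updata_list(lst):
--     if not lst:
--         a = None
--     else:
--         s = {i for i in lst if 0 <= i < 602}
--         a = [1 if i in s else 0 for i in range(602)]
--     return a
-- ===== Notes on version B (the rewrite author's own statement) =====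
-- stated objective: alternative
-- what changed: B inverts the traversal: instead of preallocating a 602-zero array and assigning 1 at each valid input index, it builds a set of the valid indices once and generates the vector by iterating over the 602 output positions with a membership test.
import Mathlib
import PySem

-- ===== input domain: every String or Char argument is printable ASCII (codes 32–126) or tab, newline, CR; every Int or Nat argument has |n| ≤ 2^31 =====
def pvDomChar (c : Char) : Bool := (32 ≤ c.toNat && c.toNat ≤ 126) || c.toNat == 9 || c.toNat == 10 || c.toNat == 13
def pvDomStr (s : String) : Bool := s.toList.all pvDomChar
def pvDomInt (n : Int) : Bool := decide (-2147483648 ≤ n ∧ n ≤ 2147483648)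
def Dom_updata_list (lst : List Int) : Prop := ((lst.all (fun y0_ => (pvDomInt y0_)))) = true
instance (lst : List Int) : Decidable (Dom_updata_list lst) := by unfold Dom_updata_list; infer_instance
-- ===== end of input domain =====

-- B builds a set of the valid indices and generates the vector over the 602 output
-- positions by membership test, instead of A's assignment into a preallocated array.

-- ===== PORT A =====
def updata_list (lst : List Int) : Option (List Int) :=
  if lst = [] then none
  else
    some (lst.foldl
      (fun a index =>
        if 0 ≤ index ∧ index < 602 then PySem.List.pySetD a index 1 else a)
      (List.replicate 602 0))

-- ===== PORT B =====
def updata_list_alt (lst : List Int) : Option (List Int) :=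
  if lst = [] then none
  else
    let s := PySem.Set.ofList (lst.filter (fun i => decide (0 ≤ i) && decide (i < 602)))
    some ((PySem.List.pyRange 0 602 1).map (fun i => if PySem.Set.contains s i then 1 else 0))

-- ===== PRECONDITION & SPEC =====
def Spec_updata_list (lst : List Int) (out : Option (List Int)) : Prop := out = updata_list_alt lst
instance (lst : List Int) (out : Option (List Int)) : Decidable (Spec_updata_list lst out) := by unfold Spec_updata_list; infer_instance

-- ===== CLAIM (what is proved, stated in full; the proofs are below) =====
def Claim_equal_updata_list : Prop := ∀ (lst : List Int), Dom_updata_list lst → Spec_updata_list lst (updata_list lst)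

-- ===== LEMMAS AND PROOFS =====

def pvStep (a : List Int) (index : Int) : List Int :=
  if 0 ≤ index ∧ index < 602 then PySem.List.pySetD a index 1 else a

theorem pvStep_length (a : List Int) (x : Int) : (pvStep a x).length = a.length := by
  unfold pvStep
  split_ifs with h
  · rw [PySem.List.pySetD_of_nonneg a 1 h.1]
    exact List.length_set ..
  · rfl

theorem pvFoldl_length (lst : List Int) (a : List Int) :
    (lst.foldl pvStep a).length = a.length := by
  induction lst generalizing a with
  | nil => rfl
  | cons x xs ih => simpa [List.foldl_cons, pvStep_length] using ih (pvStep a x)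

theorem pvFoldl_getElem (lst : List Int) (a : List Int) (j : Nat) (hj : j < a.length) :
    (lst.foldl pvStep a)[j]? =
      if (j : Int) ∈ lst.filter (fun i => decide (0 ≤ i) && decide (i < 602)) then some 1
      else a[j]? := by
  induction lst generalizing a with
  | nil => simp
  | cons x xs ih =>
    rw [List.foldl_cons]
    rw [ih (pvStep a x) (by rw [pvStep_length]; exact hj)]
    by_cases hv : 0 ≤ x ∧ x < 602
    · have hstep : pvStep a x = a.set x.toNat 1 := by
        unfold pvStep
        rw [if_pos hv, PySem.List.pySetD_of_nonneg a 1 hv.1]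
      rw [hstep]
      by_cases hmem : (j : Int) ∈ xs.filter (fun i => decide (0 ≤ i) && decide (i < 602))
      · have hcons : (j : Int) ∈ (x :: xs).filter (fun i => decide (0 ≤ i) && decide (i < 602)) :=
          List.mem_filter.mpr ⟨List.mem_cons_of_mem _ (List.mem_filter.mp hmem).1,
            (List.mem_filter.mp hmem).2⟩
        rw [if_pos hmem, if_pos hcons]
      · rw [if_neg hmem]
        by_cases hx : (j : Int) = x
        · have hcons : (j : Int) ∈ (x :: xs).filter (fun i => decide (0 ≤ i) && decide (i < 602)) := by
            rw [List.mem_filter]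
            refine ⟨by rw [hx]; exact List.mem_cons_self .., ?_⟩
            simp only [Bool.and_eq_true, decide_eq_true_eq]
            omega
          rw [if_pos hcons, List.getElem?_set]
          have h1 : x.toNat = j := by omega
          rw [if_pos h1, if_pos (h1 ▸ hj)]
        · have hcons : (j : Int) ∉ (x :: xs).filter (fun i => decide (0 ≤ i) && decide (i < 602)) := by
            intro h
            rcases List.mem_filter.mp h with ⟨hm, hd⟩
            rcases List.mem_cons.mp hm with h1 | h1
            · exact hx h1
            · exact hmem (List.mem_filter.mpr ⟨h1, hd⟩)
          rw [if_neg hcons, List.getElem?_set]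
          have h1 : x.toNat ≠ j := by omega
          rw [if_neg h1]
    · have hstep : pvStep a x = a := by unfold pvStep; rw [if_neg hv]
      rw [hstep]
      have heq : (j : Int) ∈ (x :: xs).filter (fun i => decide (0 ≤ i) && decide (i < 602)) ↔
          (j : Int) ∈ xs.filter (fun i => decide (0 ≤ i) && decide (i < 602)) := by
        constructor
        · intro h
          rcases List.mem_filter.mp h with ⟨hm, hd⟩
          rcases List.mem_cons.mp hm with h1 | h1
          · exfalso; apply hv; subst h1; simpa using hd
          · exact List.mem_filter.mpr ⟨h1, hd⟩
        · intro h
          rcases List.mem_filter.mp h with ⟨hm, hd⟩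
          exact List.mem_filter.mpr ⟨List.mem_cons_of_mem _ hm, hd⟩
      by_cases hmem : (j : Int) ∈ xs.filter (fun i => decide (0 ≤ i) && decide (i < 602))
      · rw [if_pos hmem, if_pos (heq.mpr hmem)]
      · rw [if_neg hmem, if_neg (fun h => hmem (heq.mp h))]

-- ===== VERDICT (by name: the statement is the Claim_ definition above) =====
set_option maxRecDepth 8192 in
theorem updata_list_spec : Claim_equal_updata_list := by
  intro lst _
  unfold Spec_updata_list updata_list updata_list_alt
  by_cases hnil : lst = []
  · rw [hnil]; rfl
  · rw [if_neg hnil, if_neg hnil]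
    congr 1
    have hfold : (fun (a : List Int) (index : Int) =>
        if 0 ≤ index ∧ index < 602 then PySem.List.pySetD a index 1 else a) = pvStep := rfl
    rw [hfold]
    apply List.ext_getElem?
    intro j
    by_cases hj : j < 602
    · rw [pvFoldl_getElem lst (List.replicate 602 0) j (by simpa using hj)]
      have hr : ((PySem.List.pyRange 0 602 1).map
          (fun i => if PySem.Set.contains (PySem.Set.ofList (lst.filter (fun i => decide (0 ≤ i) && decide (i < 602)))) i then (1 : Int) else 0))[j]? =
          some (if PySem.Set.contains (PySem.Set.ofList (lst.filter (fun i => decide (0 ≤ i) && decide (i < 602)))) (j : Int) then (1 : Int) else 0) :=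
        PySem.List.getElem?_map_pyRange_zero _ _ _ hj
      rw [hr]
      have hc : PySem.Set.contains (PySem.Set.ofList (lst.filter (fun i => decide (0 ≤ i) && decide (i < 602)))) (j : Int) =
          decide ((j : Int) ∈ lst.filter (fun i => decide (0 ≤ i) && decide (i < 602))) := by
        by_cases hmem : (j : Int) ∈ lst.filter (fun i => decide (0 ≤ i) && decide (i < 602))
        · simp [hmem, PySem.Set.mem_ofList]
        · simp only [hmem, decide_false]
          rw [Bool.eq_false_iff]
          intro h
          rw [PySem.Set.contains_iff, PySem.Set.mem_ofList] at h
          exact hmem h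
      rw [hc]
      by_cases hmem : (j : Int) ∈ lst.filter (fun i => decide (0 ≤ i) && decide (i < 602))
      · simp [hmem]
      · rw [if_neg hmem]
        simp only [hmem, decide_false, Bool.false_eq_true, if_false]
        rw [List.getElem?_eq_getElem (by simpa using hj : j < (List.replicate 602 (0:Int)).length),
          List.getElem_replicate]
    · have h1 : (lst.foldl pvStep (List.replicate 602 0)).length ≤ j := by
        rw [pvFoldl_length]; simpa using Nat.le_of_not_lt hj
      have h2 : ((PySem.List.pyRange 0 602 1).map
          (fun i => if PySem.Set.contains (PySem.Set.ofList (lst.filter (fun i => decide (0 ≤ i) && decide (i < 602)))) i then (1 : Int) else 0)).length ≤ j := by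
        rw [List.length_map, PySem.List.length_pyRange_one]
        omega
      rw [List.getElem?_eq_none h1, List.getElem?_eq_none h2]
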